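-- pv_equiv track=rewrite | github.com/Lax125/renderer | renderer/engine.py | mix_permute
-- ===== SOURCE A (Python) =====
-- def mix_permute(lA, lB):
--   '''Generates mixtures of lA and lB in a strict order'''
--   # mix_permute([A, B, C], [D, E, F])
--   # == ([A, B, C],
--   #     [A, B, F],
--   #     [A, E, C],
--   #     [A, E, F],
--   #     [D, B, C],
--   #     [D, B, F],
--   #     [D, E, C],
--   #     [D, E, F]
--   #     )
--   assert len(lA) == len(lB)
--   if len(lA) == 0:
--     yield []
--     return
--   for result in mix_permute(lA[:-1], lB[:-1]):
--     yield result + [lA[-1]]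
--     yield result + [lB[-1]]
-- ===== SOURCE B (Python) =====
-- def mix_permute(lA, lB):
--   '''Generates mixtures of lA and lB in a strict order'''
--   # Non-recursive: the j-th yielded mixture is read off from the base-2
--   # digits of j (most significant digit decides the first position).
--   assert len(lA) == len(lB)
--   n = len(lA)
--   pows = [2 ** (n - 1 - i) for i in range(n)]
--   for k in range(2 ** n):
--     yield [lB[i] if (k // pows[i]) % 2 == 1 else lA[i] for i in range(n)]
-- ===== Notes on version B (the rewrite author's own statement) =====
-- stated objective: alternative
-- what changed: Replaces the recursion on the lists' last elements with a single loop over k in range(2**n) that decodes each mixture directly from k's binary digits (MSB first), so no recursive calls or list slicing remain.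
import Mathlib
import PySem

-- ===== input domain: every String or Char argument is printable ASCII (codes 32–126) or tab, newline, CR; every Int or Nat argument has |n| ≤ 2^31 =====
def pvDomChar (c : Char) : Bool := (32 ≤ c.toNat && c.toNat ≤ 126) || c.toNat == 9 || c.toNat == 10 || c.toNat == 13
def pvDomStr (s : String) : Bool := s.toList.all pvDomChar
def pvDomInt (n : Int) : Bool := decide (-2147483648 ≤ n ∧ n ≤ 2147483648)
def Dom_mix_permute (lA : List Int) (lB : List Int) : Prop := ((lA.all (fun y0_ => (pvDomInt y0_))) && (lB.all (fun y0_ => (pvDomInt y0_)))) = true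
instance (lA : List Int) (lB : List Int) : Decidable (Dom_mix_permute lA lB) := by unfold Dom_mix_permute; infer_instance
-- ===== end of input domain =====

-- B replaces A's recursion on the lists' last elements by one loop that decodes mixture k from k's
-- binary digits (alternative decomposition, same cost); equivalence is about the full yielded sequence.


-- ===== PORT A =====
-- lA[:-1] is List.dropLast (exact for every list); lA[-1] is pyGetD lA (-1) 0 (never read on the
-- empty list: that case returned already); the two yields per recursive result become a flatMap.
def mix_permute (lA : List Int) (lB : List Int) : List (List Int) :=
  if _h : lA.length = 0 then [[]]
  else
    (mix_permute lA.dropLast lB.dropLast).flatMap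
      (fun result => [result ++ [PySem.List.pyGetD lA (-1) 0],
                      result ++ [PySem.List.pyGetD lB (-1) 0]])
termination_by lA.length
decreasing_by simp [List.length_dropLast]; omega

-- ===== PORT B =====
-- Source B's loop over range(2**n) with an inner comprehension over range(n); n-1-i is computed in Nat
-- (equal to Python's int value since 0 ≤ i < n); lA[i]/lB[i] are pyGetD (in range for 0 ≤ i < n).
def mix_permute_alt (lA : List Int) (lB : List Int) : List (List Int) :=
  let n := lA.length
  let pows := (PySem.List.pyRange 0 (n : Int) 1).map (fun i => (2 : Int) ^ (n - 1 - i.toNat))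
  (PySem.List.pyRange 0 ((2 : Int) ^ n) 1).map (fun k =>
    (PySem.List.pyRange 0 (n : Int) 1).map (fun i =>
      if PySem.Int.mod (PySem.Int.floordiv k (PySem.List.pyGetD pows i 0)) 2 = 1
      then PySem.List.pyGetD lB i 0 else PySem.List.pyGetD lA i 0))

-- ===== PRECONDITION & SPEC =====
-- Pre_ excludes exactly the inputs of unequal length, on which A's assert raises AssertionError.
def Pre_mix_permute (lA : List Int) (lB : List Int) : Prop := lA.length = lB.length
instance (lA : List Int) (lB : List Int) : Decidable (Pre_mix_permute lA lB) := by unfold Pre_mix_permute; infer_instance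
def pvWitness_mix_permute : List Int × List Int := ([1, 2], [3, 4])

def Spec_mix_permute (lA : List Int) (lB : List Int) (out : List (List Int)) : Prop := out = mix_permute_alt lA lB
instance (lA : List Int) (lB : List Int) (out : List (List Int)) : Decidable (Spec_mix_permute lA lB out) := by unfold Spec_mix_permute; infer_instance

-- ===== CLAIM (what is proved, stated in full; the proofs are below) =====
def Claim_equal_mix_permute : Prop := ∀ (lA : List Int) (lB : List Int), Dom_mix_permute lA lB → Pre_mix_permute lA lB → Spec_mix_permute lA lB (mix_permute lA lB)

-- ===== LEMMAS AND PROOFS =====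

-- Nat-level reference form of B (proof-only helper).
def pvRef (lA lB : List Int) : List (List Int) :=
  (List.range (2 ^ lA.length)).map (fun k =>
    (List.range lA.length).map (fun i =>
      if (k / 2 ^ (lA.length - 1 - i)) % 2 = 1 then lB.getD i 0 else lA.getD i 0))

theorem alt_eq_ref (lA lB : List Int) : mix_permute_alt lA lB = pvRef lA lB := by
  have hpow : ∀ e : Nat, (2 : Int) ^ e = ((2 ^ e : Nat) : Int) := by intro e; push_cast; ring
  have houter : PySem.List.pyRange 0 ((2 : Int) ^ lA.length) 1
      = (List.range (2 ^ lA.length)).map (fun k : Nat => (k : Int)) := by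
    rw [PySem.List.pyRange_one, sub_zero, hpow lA.length, Int.toNat_natCast]
    simp only [zero_add]
  have hinner : PySem.List.pyRange 0 (lA.length : Int) 1
      = (List.range lA.length).map (fun k : Nat => (k : Int)) := by
    rw [PySem.List.pyRange_one]; simp
  unfold mix_permute_alt pvRef
  dsimp only
  rw [houter, List.map_map]
  simp only [Function.comp_def]
  apply List.map_congr_left
  intro k _
  rw [hinner, List.map_map, List.map_map]
  simp only [Function.comp_def, Int.toNat_natCast]
  apply List.map_congr_left
  intro i hi
  have hi' : i < lA.length := List.mem_range.mp hi
  have hpows : ((List.range lA.length).map (fun j : Nat => (2 : Int) ^ (lA.length - 1 - j))).getD i 0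
      = (2 : Int) ^ (lA.length - 1 - i) := by
    rw [List.getD_eq_getElem?_getD]; simp [hi']
  simp only [PySem.List.pyGetD_natCast, hpows]
  have h2 : ((2 : Nat) : Int) = (2 : Int) := by norm_num
  rw [hpow, PySem.Int.floordiv_natCast, ← h2, PySem.Int.mod_natCast]
  simp
  norm_cast

theorem pv_range_two_mul (N : Nat) :
    List.range (2 * N) = (List.range N).flatMap (fun q => [2 * q, 2 * q + 1]) := by
  induction N with
  | zero => rfl
  | succ N ih =>
      have h1 : 2 * (N + 1) = (2 * N + 1) + 1 := by ring
      simp [h1, List.range_succ, ih]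

theorem ref_step (l m : List Int) (a b : Int) (h : l.length = m.length) :
    pvRef (l ++ [a]) (m ++ [b]) =
      (pvRef l m).flatMap (fun r => [r ++ [a], r ++ [b]]) := by
  unfold pvRef
  simp only [List.length_append, List.length_cons, List.length_nil, Nat.zero_add,
    Nat.add_sub_cancel]
  have hpow : 2 ^ (l.length + 1) = 2 * 2 ^ l.length := by rw [pow_succ]; ring
  rw [hpow, pv_range_two_mul, List.map_flatMap, List.flatMap_map]
  apply List.flatMap_congr
  intro q _
  have key : ∀ r : Nat, r < 2 →
      (List.range (l.length + 1)).map (fun i =>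
        if ((2 * q + r) / 2 ^ (l.length - i)) % 2 = 1 then (m ++ [b]).getD i 0
        else (l ++ [a]).getD i 0) =
      ((List.range l.length).map (fun i =>
        if (q / 2 ^ (l.length - 1 - i)) % 2 = 1 then m.getD i 0 else l.getD i 0)) ++
      [if r = 1 then b else a] := by
    intro r hr
    rw [List.range_succ, List.map_append]
    congr 1
    · apply List.map_congr_left
      intro i hi
      have hi' : i < l.length := List.mem_range.mp hi
      have hdiv : (2 * q + r) / 2 ^ (l.length - i) = q / 2 ^ (l.length - 1 - i) := by
        have e : l.length - i = (l.length - 1 - i) + 1 := by omega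
        rw [e, pow_succ', ← Nat.div_div_eq_div_mul]
        have : (2 * q + r) / 2 = q := by omega
        rw [this]
      rw [hdiv, List.getD_append l [a] 0 i hi', List.getD_append m [b] 0 i (by omega)]
    · have hl : (l ++ [a])[l.length]?.getD 0 = a := by simp
      have hm : (m ++ [b])[l.length]?.getD 0 = b := by rw [h]; simp
      have hd : (2 * q + r) / 2 ^ (l.length - l.length) = 2 * q + r := by
        simp
      simp only [List.map_cons, List.map_nil, hd]
      interval_cases r
      · simp
      · simp [hm]
  simp only [List.map_cons, List.map_nil]
  have key0 := key 0 (by omega)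
  have key1 := key 1 (by omega)
  rw [Nat.add_zero, if_neg (by omega : ¬(0 : Nat) = 1)] at key0
  rw [if_pos rfl] at key1
  rw [key0, key1]

theorem a_eq_ref (n : Nat) (lA lB : List Int) (hA : lA.length = n) (hB : lB.length = n) :
    mix_permute lA lB = pvRef lA lB := by
  induction n generalizing lA lB with
  | zero =>
      have h1 : lA = [] := List.eq_nil_iff_length_eq_zero.mpr hA
      have h2 : lB = [] := List.eq_nil_iff_length_eq_zero.mpr hB
      subst h1; subst h2
      rw [mix_permute]
      rfl
  | succ n ih =>
      rcases lA.eq_nil_or_concat with rfl | ⟨l, a, rfl⟩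
      · simp at hA
      rcases lB.eq_nil_or_concat with rfl | ⟨m, b, rfl⟩
      · simp at hB
      simp only [List.concat_eq_append] at hA hB ⊢
      have hl : l.length = n := by simpa using hA
      have hm : m.length = n := by simpa using hB
      have hne : ¬(l ++ [a]).length = 0 := by simp
      rw [mix_permute, dif_neg hne, List.dropLast_concat, List.dropLast_concat]
      simp only [PySem.List.pyGetD_neg_one_append_singleton]
      rw [ih l m hl hm, ref_step l m a b (by omega)]

-- ===== VERDICT (by name: the statement is the Claim_ definition above) =====
theorem mix_permute_spec : Claim_equal_mix_permute := by
  intro lA lB _ hpre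
  unfold Spec_mix_permute
  rw [alt_eq_ref, a_eq_ref lA.length lA lB rfl hpre.symm]
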